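-- pv_equiv track=rewrite | github.com/1337DaKL/Bai_Tap_Python | 28tech/dequy/mangtoanchan.py | chan
-- ===== SOURCE A (Python) =====
-- def chan(a, n):
--     if (n == 0):
--         if (a[n] % 2 == 0):
--             return True
--         else:
--             return False
--     else:
--         if (a[n] % 2 == 1):
--             return False
--         else:
--             return chan(a, n - 1)
-- ===== SOURCE B (Python) =====
-- def chan(a, n):
--     if a[n] % 2 == 1:
--         return False
--     i = n if n >= 0 else n + len(a)
--     return all(x % 2 == 0 for x in a[:i])
-- ===== Notes on version B (the rewrite author's own statement) =====
-- stated objective: idiomatic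
-- what changed: Replaces the recursive index-by-index descent with one endpoint check a[n] followed by a single all() over the slice a[:i] (n normalised to its front-based position), so there is no recursion or explicit loop at all.
import Mathlib
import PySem

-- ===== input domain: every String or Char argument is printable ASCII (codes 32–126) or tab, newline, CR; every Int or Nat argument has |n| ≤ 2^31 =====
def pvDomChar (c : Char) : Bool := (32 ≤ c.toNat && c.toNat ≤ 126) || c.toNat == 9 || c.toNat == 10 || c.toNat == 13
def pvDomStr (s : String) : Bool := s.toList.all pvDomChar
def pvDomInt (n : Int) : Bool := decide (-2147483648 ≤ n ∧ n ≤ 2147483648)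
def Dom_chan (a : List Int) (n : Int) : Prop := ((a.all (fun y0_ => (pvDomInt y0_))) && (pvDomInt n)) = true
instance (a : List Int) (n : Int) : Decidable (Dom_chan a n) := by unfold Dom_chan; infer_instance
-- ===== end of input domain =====

-- B replaces A's recursive descent by one endpoint check a[n] plus all() over the slice a[:i]; equivalence is on return values, inputs where A raises IndexError are outside Pre_chan.
-- ===== PORT A =====
-- literal port of A's recursion; 'none' from pyGet? is Python's IndexError (excluded by Pre_chan)
def chan (a : List Int) (n : Int) : Bool :=
  match h : PySem.List.pyGet? a n with
  | none => false
  | some x =>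
    if n == 0 then
      if x % 2 == 0 then true else false
    else
      if x % 2 == 1 then false
      else chan a (n - 1)
termination_by (n + a.length + 1).toNat
decreasing_by
  have := PySem.List.pyGet?_eq_none_iff (xs := a) (i := n)
  simp [PySem.Raise.InRange, h] at this
  omega

-- ===== PORT B =====
-- port of Source B: endpoint check a[n] (none = IndexError, outside Pre_chan), then all-even over the slice a[:i]
def chan_alt (a : List Int) (n : Int) : Bool :=
  match PySem.List.pyGet? a n with
  | none => false
  | some x =>
    if x % 2 == 1 then false
    else
      let i : Int := if 0 ≤ n then n else n + a.length
      (PySem.List.slice a none (some i)).all (fun y => y % 2 == 0)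

-- ===== PRECONDITION & SPEC =====
-- Pre_chan holds exactly where the Python A returns without an IndexError: a valid non-negative
-- index n, or a negative n whose descent n, n-1, … meets an odd element before running off the
-- front of the list (positions 0 … n + len(a) viewed from the front).
def Pre_chan (a : List Int) (n : Int) : Prop :=
  (0 ≤ n ∧ n < a.length) ∨ (n < 0 ∧ ∃ x ∈ a.take (n + a.length + 1).toNat, x % 2 = 1)
instance (a : List Int) (n : Int) : Decidable (Pre_chan a n) := by unfold Pre_chan; infer_instance
def pvWitness_chan : List Int × Int := ([2, 4, 6], 2)
def Spec_chan (a : List Int) (n : Int) (out : Bool) : Prop := out = chan_alt a n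
instance (a : List Int) (n : Int) (out : Bool) : Decidable (Spec_chan a n out) := by unfold Spec_chan; infer_instance

-- ===== CLAIM (what is proved, stated in full; the proofs are below) =====
def Claim_equal_chan : Prop := ∀ (a : List Int) (n : Int), Dom_chan a n → Pre_chan a n → Spec_chan a n (chan a n)

-- ===== LEMMAS AND PROOFS =====

-- on a valid non-negative index, A computes 'all of a[0..k] even'
theorem chan_nonneg (a : List Int) (k : Nat) (hk : k < a.length) :
    chan a (k : Int) = (a.take (k + 1)).all (fun x => x % 2 == 0) := by
  induction k with
  | zero =>
      rw [chan]
      rw [PySem.List.pyGet?_ofNat (h := hk)]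
      have h1 : a.take 1 = [a[0]] := by
        rcases a with _ | ⟨y, l⟩
        · simp at hk
        · simp
      rw [h1]
      simp only [List.all_cons, List.all_nil, Bool.and_true, Nat.cast_zero,
        beq_self_eq_true, if_true]
      split <;> simp_all
  | succ k ih =>
      rw [chan]
      rw [PySem.List.pyGet?_ofNat (h := hk)]
      have hk' : k < a.length := by omega
      have hne : ((k : Int) + 1 == 0) = false := by simp; omega
      push_cast
      simp only [hne, Bool.false_eq_true, if_false, add_sub_cancel_right]
      rw [ih hk']
      rw [List.take_add_one (i := k + 1)]
      have h2 : a[k + 1]?.toList = [a[k + 1]] := by simp [hk]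
      rw [h2]
      simp only [List.all_append, List.all_cons, List.all_nil, Bool.and_true]
      rcases Int.emod_two_eq a[k + 1] with h3 | h3 <;> simp [h3]

-- on a negative n whose descent meets an odd element, A returns false
theorem chan_neg_false (j : Nat) : ∀ (a : List Int) (n : Int), n < 0 → n + a.length = j →
    (∃ x ∈ a.take (j + 1), x % 2 = 1) → chan a n = false := by
  induction j with
  | zero =>
      intro a n hn hj hodd
      obtain ⟨x, hx, hx1⟩ := hodd
      have hlen : 0 < a.length := by
        by_contra h
        simp [List.length_eq_zero_iff.mp (by omega)] at hx
      have hget : PySem.List.pyGet? a n = some (a[0]'hlen) := by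
        have hn' : n = -(a.length : Int) := by omega
        rw [hn', PySem.List.pyGet?_neg_natCast a a.length (by omega) (by omega)]
        simp [hlen]
      rw [chan, hget]
      have hx0 : x = a[0]'hlen := by
        rcases a with _ | ⟨y, l⟩
        · simp at hlen
        · simp at hx; simp [hx]
      have hne : (n == 0) = false := by simp; omega
      simp [hne, ← hx0, hx1]
  | succ j ih =>
      intro a n hn hj hodd
      have hb : j + 1 < a.length := by omega
      have hget : PySem.List.pyGet? a n = some (a[j + 1]'hb) := by
        have hnk : n = -((a.length - (j + 1) : Nat) : Int) := by omega
        rw [hnk, PySem.List.pyGet?_neg_natCast a (a.length - (j + 1)) (by omega) (by omega)]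
        have h4 : a.length - (a.length - (j + 1)) = j + 1 := by omega
        simp [h4, hb]
      rw [chan, hget]
      have hne : (n == 0) = false := by simp; omega
      simp only [hne, Bool.false_eq_true, if_false]
      rcases Int.emod_two_eq (a[j + 1]'hb) with h2 | h2
      · -- a[j+1] even: the odd element lies strictly before, recurse
        simp only [h2]
        have h5 : ((0 : Int) == 1) = false := by decide
        simp only [h5, Bool.false_eq_true, if_false]
        apply ih a (n - 1) (by omega) (by omega)
        obtain ⟨x, hx, hx1⟩ := hodd
        refine ⟨x, ?_, hx1⟩
        rw [List.take_add_one (i := j + 1)] at hx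
        rcases List.mem_append.mp hx with h | h
        · exact h
        · exfalso
          simp [hb] at h
          rw [h] at hx1; omega
      · simp [h2]

-- ===== VERDICT (by name: the statement is the Claim_ definition above) =====
theorem chan_spec : Claim_equal_chan := by
  intro a n _ hpre
  unfold Spec_chan chan_alt
  rcases hpre with ⟨hn0, hnlen⟩ | ⟨hn0, hodd⟩
  · -- n ≥ 0: A is 'take (n+1) all even'; B splits it as endpoint && take n
    have hk : n = ((n.toNat : Nat) : Int) := by omega
    have hlt : n.toNat < a.length := by omega
    rw [hk, chan_nonneg a n.toNat hlt]
    rw [PySem.List.pyGet?_ofNat (h := hlt)]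
    simp only [if_pos (by positivity : (0:Int) ≤ (n.toNat : Int))]
    rw [PySem.List.slice_to_natCast]
    rw [List.take_add_one (i := n.toNat)]
    have h2 : a[n.toNat]?.toList = [a[n.toNat]] := by simp [hlt]
    rw [h2]
    simp only [List.all_append, List.all_cons, List.all_nil, Bool.and_true]
    rcases Int.emod_two_eq a[n.toNat] with h3 | h3 <;> simp [h3]
  · -- n < 0: A returns false, and B finds an odd element (at the endpoint or in the slice)
    have hj : n + (a.length : Int) = (((n + a.length).toNat : Nat) : Int) := by
      obtain ⟨x, hx, _⟩ := hodd
      have : (n + a.length + 1).toNat ≠ 0 := by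
        intro h; simp [h] at hx
      omega
    have hA : chan a n = false :=
      chan_neg_false (n + a.length).toNat a n hn0 hj
        (by
          obtain ⟨x, hx, hx1⟩ := hodd
          exact ⟨x, by convert hx using 2; omega, hx1⟩)
    rw [hA]
    set j : Nat := (n + a.length).toNat with hjdef
    have hjlt : j < a.length := by omega
    have hget : PySem.List.pyGet? a n = some (a[j]'hjlt) := by
      have hnk : n = -((a.length - j : Nat) : Int) := by omega
      rw [hnk, PySem.List.pyGet?_neg_natCast a (a.length - j) (by omega) (by omega)]
      have h4 : a.length - (a.length - j) = j := by omega
      simp [h4, hjlt]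
    rw [hget]
    rcases Int.emod_two_eq (a[j]'hjlt) with h2 | h2
    · -- endpoint even: the odd element is strictly before it, so the slice's all() is false
      simp only [h2, show ((0:Int) == 1) = false from rfl, Bool.false_eq_true, if_false]
      simp only [if_neg (by omega : ¬ (0:Int) ≤ n)]
      rw [hj, PySem.List.slice_to_natCast]
      obtain ⟨x, hx, hx1⟩ := hodd
      have hx' : x ∈ a.take (j + 1) := by convert hx using 2; omega
      rw [List.take_add_one (i := j)] at hx'
      have hxj : x ∈ a.take j := by
        rcases List.mem_append.mp hx' with h | h
        · exact h
        · exfalso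
          simp [hjlt] at h
          rw [h] at hx1; omega
      symm
      simp only [List.all_eq_false]
      exact ⟨x, hxj, by simp [hx1]⟩
    · simp [h2]
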